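-- pv_equiv track=rewrite | github.com/showemeowkx/Graph-visualizer | matrix.py | convertMatrix
-- ===== SOURCE A (Python) =====
-- def convertMatrix(matrix):
--     size = len(matrix)
--     matrixUndir = [[0]*size for _ in range(size)]
--     for i in range(size):
--         for j in range(size):
--             if matrix[i][j] == 1:
--                 matrixUndir[i][j] = 1
--                 matrixUndir[j][i] = 1
--
--     return matrixUndir
-- ===== SOURCE B (Python) =====
-- def convertMatrix(matrix):
--     size = len(matrix)
--     rows = [row[:size] for row in matrix]
--     cols = [list(c) for c in zip(*rows)]
--     return [[1 if rows[i][j] == 1 or cols[i][j] == 1 else 0 for j in range(size)]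
--             for i in range(size)]
-- ===== Notes on version B (the rewrite author's own statement) =====
-- stated objective: alternative
-- what changed: A scatters: starts from a zero matrix and, for each entry equal to 1, writes 1 into both mirror cells in place; B gathers: it builds an explicit transpose table and computes every output cell independently as 1 iff the cell or its transpose cell is 1, with no mutation.
import Mathlib
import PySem

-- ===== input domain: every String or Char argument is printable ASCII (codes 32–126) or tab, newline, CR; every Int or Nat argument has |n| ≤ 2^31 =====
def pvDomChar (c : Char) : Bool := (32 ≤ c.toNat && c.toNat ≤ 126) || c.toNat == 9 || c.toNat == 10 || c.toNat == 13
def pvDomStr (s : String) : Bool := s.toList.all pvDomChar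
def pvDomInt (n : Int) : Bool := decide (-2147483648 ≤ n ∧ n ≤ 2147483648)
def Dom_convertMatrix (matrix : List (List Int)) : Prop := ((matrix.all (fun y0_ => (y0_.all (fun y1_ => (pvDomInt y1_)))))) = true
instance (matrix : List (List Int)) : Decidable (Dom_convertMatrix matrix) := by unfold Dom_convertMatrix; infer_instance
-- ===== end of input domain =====

-- B symmetrizes by GATHERING (transpose table + per-cell OR) instead of A's in-place scatter; objective: alternative (same cost).

-- ===== PORT A =====
-- matrixUndir[i][j] = 1  (a Python list assignment; i, j are in range here)
def pvSetCell (m : List (List Int)) (i j : Nat) : List (List Int) :=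
  m.set i ((m.getD i []).set j 1)

def convertMatrix (matrix : List (List Int)) : List (List Int) :=
  let size := matrix.length
  let matrixUndir := (List.range size).map (fun _ => List.replicate size (0 : Int))
  (List.range size).foldl (fun acc i =>
    (List.range size).foldl (fun acc j =>
      if (matrix.getD i []).getD j 0 = 1 then
        pvSetCell (pvSetCell acc i j) j i
      else acc) acc) matrixUndir

-- ===== PORT B =====
def convertMatrix_alt (matrix : List (List Int)) : List (List Int) :=
  let size := matrix.length
  let rows := matrix.map (fun r => r.take size)
  let cols := (List.range size).map (fun j => rows.map (fun r => r.getD j 0))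
  (List.range size).map (fun i =>
    (List.range size).map (fun j =>
      if ((rows.getD i []).getD j 0 = (1:Int)) ∨ ((cols.getD i []).getD j 0 = (1:Int)) then (1 : Int) else 0))

-- ===== PRECONDITION & SPEC =====
-- Pre_ excludes exactly the ragged inputs (a row shorter than len(matrix)) on which A raises IndexError.
def Pre_convertMatrix (matrix : List (List Int)) : Prop :=
  ∀ row ∈ matrix, matrix.length ≤ row.length
instance (matrix : List (List Int)) : Decidable (Pre_convertMatrix matrix) := by
  unfold Pre_convertMatrix; infer_instance

def pvWitness_convertMatrix : List (List Int) := [[1, 0], [0, 2]]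

def Spec_convertMatrix (matrix : List (List Int)) (out : List (List Int)) : Prop := out = convertMatrix_alt matrix
instance (matrix : List (List Int)) (out : List (List Int)) : Decidable (Spec_convertMatrix matrix out) := by unfold Spec_convertMatrix; infer_instance

-- ===== CLAIM (what is proved, stated in full; the proofs are below) =====
def Claim_equal_convertMatrix : Prop := ∀ (matrix : List (List Int)), Dom_convertMatrix matrix → Pre_convertMatrix matrix → Spec_convertMatrix matrix (convertMatrix matrix)

-- ===== LEMMAS AND PROOFS =====

-- cell read, Python style: m[p][q] with defaults
def pvGetC (m : List (List Int)) (p q : Nat) : Int := (m.getD p []).getD q 0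

-- n × n shape invariant
def pvShape (n : Nat) (m : List (List Int)) : Prop :=
  m.length = n ∧ ∀ k < n, (m.getD k []).length = n

theorem pv_getD_set {α : Type} (l : List α) (i p : Nat) (a d : α) :
    (l.set i a).getD p d = if p = i ∧ i < l.length then a else l.getD p d := by
  rcases Nat.lt_or_ge p l.length with hp | hp
  · have hp' : p < (l.set i a).length := by simpa using hp
    rw [List.getD_eq_getElem _ _ hp', List.getD_eq_getElem _ _ hp, List.getElem_set]
    by_cases h : i = p
    · subst h; simp [hp]
    · have hne : ¬ (p = i ∧ i < l.length) := fun ⟨e, _⟩ => h e.symm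
      simp [h, hne]
  · have h1 : (l.set i a).getD p d = d := by
      apply List.getD_eq_default; simpa using hp
    have h2 : l.getD p d = d := List.getD_eq_default _ _ hp
    have : ¬ (p = i ∧ i < l.length) := by rintro ⟨rfl, h⟩; omega
    rw [h1, if_neg this, h2]

theorem pvSetCell_getC (n : Nat) (m : List (List Int)) (i j p q : Nat)
    (hm : pvShape n m) (hi : i < n) (hj : j < n) :
    pvGetC (pvSetCell m i j) p q = if p = i ∧ q = j then 1 else pvGetC m p q := by
  obtain ⟨hlen, hrow⟩ := hm
  have hi' : i < m.length := by omega
  have hj' : j < (m.getD i []).length := by rw [hrow i hi]; omega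
  unfold pvGetC pvSetCell
  rw [pv_getD_set]
  by_cases hp : p = i
  · subst hp
    rw [if_pos ⟨rfl, hi'⟩, pv_getD_set]
    by_cases hq : q = j
    · rw [if_pos ⟨hq, hj'⟩, if_pos ⟨rfl, hq⟩]
    · have hne2 : ¬ (q = j ∧ j < (m.getD p []).length) := fun ⟨e, _⟩ => hq e
      have hne3 : ¬ (p = p ∧ q = j) := fun ⟨_, e⟩ => hq e
      rw [if_neg hne2, if_neg hne3]
  · have h1 : ¬ (p = i ∧ i < m.length) := fun ⟨e, _⟩ => hp e
    have h2 : ¬ (p = i ∧ q = j) := fun ⟨e, _⟩ => hp e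
    rw [if_neg h1, if_neg h2]

theorem pvSetCell_shape (n : Nat) (m : List (List Int)) (i j : Nat)
    (hm : pvShape n m) : pvShape n (pvSetCell m i j) := by
  obtain ⟨hlen, hrow⟩ := hm
  constructor
  · simpa [pvSetCell] using hlen
  · intro k hk
    unfold pvSetCell
    rw [pv_getD_set]
    split_ifs with h
    · rw [List.length_set]; exact hrow i (by omega)
    · exact hrow k hk

theorem pvStep_shape (matrix : List (List Int)) (n : Nat) (acc : List (List Int)) (ij : Nat × Nat)
    (hm : pvShape n acc) :
    pvShape n (if pvGetC matrix ij.1 ij.2 = 1 then pvSetCell (pvSetCell acc ij.1 ij.2) ij.2 ij.1 else acc) := by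
  split_ifs with h
  · exact pvSetCell_shape n _ _ _ (pvSetCell_shape n _ _ _ hm)
  · exact hm

theorem pv_fold_getC (matrix : List (List Int)) (n : Nat) (p q : Nat)
    (L : List (Nat × Nat)) :
    ∀ acc, pvShape n acc → (∀ ij ∈ L, ij.1 < n ∧ ij.2 < n) →
    pvGetC (L.foldl (fun acc ij =>
        if pvGetC matrix ij.1 ij.2 = 1 then pvSetCell (pvSetCell acc ij.1 ij.2) ij.2 ij.1 else acc) acc) p q
      = if (∃ ij ∈ L, pvGetC matrix ij.1 ij.2 = 1 ∧ ((p = ij.1 ∧ q = ij.2) ∨ (p = ij.2 ∧ q = ij.1)))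
        then 1 else pvGetC acc p q := by
  induction L with
  | nil => intro acc _ _; simp
  | cons x L ih =>
    intro acc hacc hmem
    rw [List.foldl_cons]
    rw [ih _ (pvStep_shape matrix n acc x hacc) (fun ij h => hmem ij (List.mem_cons_of_mem x h))]
    obtain ⟨hx1, hx2⟩ := hmem x List.mem_cons_self
    have hstep : pvGetC (if pvGetC matrix x.1 x.2 = 1 then pvSetCell (pvSetCell acc x.1 x.2) x.2 x.1 else acc) p q
        = if pvGetC matrix x.1 x.2 = 1 ∧ ((p = x.1 ∧ q = x.2) ∨ (p = x.2 ∧ q = x.1)) then 1 else pvGetC acc p q := by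
      split_ifs with h1 h2 h3
      · rcases h2.2 with ⟨rfl, rfl⟩ | ⟨rfl, rfl⟩
        · rw [pvSetCell_getC n _ _ _ _ _ (pvSetCell_shape n acc _ _ hacc) hx2 hx1]
          split_ifs with h
          · rfl
          · rw [pvSetCell_getC n _ _ _ _ _ hacc hx1 hx2, if_pos ⟨rfl, rfl⟩]
        · rw [pvSetCell_getC n _ _ _ _ _ (pvSetCell_shape n acc _ _ hacc) hx2 hx1, if_pos ⟨rfl, rfl⟩]
      · rw [pvSetCell_getC n _ _ _ _ _ (pvSetCell_shape n acc _ _ hacc) hx2 hx1,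
          pvSetCell_getC n _ _ _ _ _ hacc hx1 hx2]
        have e1 : ¬ (p = x.2 ∧ q = x.1) := fun h => h2 ⟨h1, Or.inr h⟩
        have e2 : ¬ (p = x.1 ∧ q = x.2) := fun h => h2 ⟨h1, Or.inl h⟩
        rw [if_neg e1, if_neg e2]
      · exact absurd h3.1 h1
      · rfl
    rw [hstep]
    by_cases hL : ∃ ij ∈ L, pvGetC matrix ij.1 ij.2 = 1 ∧ ((p = ij.1 ∧ q = ij.2) ∨ (p = ij.2 ∧ q = ij.1))
    · have hcons : ∃ ij ∈ x :: L, pvGetC matrix ij.1 ij.2 = 1 ∧ ((p = ij.1 ∧ q = ij.2) ∨ (p = ij.2 ∧ q = ij.1)) := by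
        obtain ⟨ij, h, hh⟩ := hL; exact ⟨ij, List.mem_cons_of_mem x h, hh⟩
      rw [if_pos hL, if_pos hcons]
    · rw [if_neg hL]
      by_cases hx : pvGetC matrix x.1 x.2 = 1 ∧ ((p = x.1 ∧ q = x.2) ∨ (p = x.2 ∧ q = x.1))
      · rw [if_pos hx, if_pos ⟨x, List.mem_cons_self, hx⟩]
      · have hnone : ¬ ∃ ij ∈ x :: L, pvGetC matrix ij.1 ij.2 = 1 ∧ ((p = ij.1 ∧ q = ij.2) ∨ (p = ij.2 ∧ q = ij.1)) := by
          rintro ⟨ij, hij, hh⟩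
          rcases List.mem_cons.1 hij with rfl | h
          · exact hx hh
          · exact hL ⟨ij, h, hh⟩
        rw [if_neg hx, if_neg hnone]

theorem pv_fold_shape (matrix : List (List Int)) (n : Nat) (L : List (Nat × Nat)) :
    ∀ acc, pvShape n acc →
    pvShape n (L.foldl (fun acc ij =>
        if pvGetC matrix ij.1 ij.2 = 1 then pvSetCell (pvSetCell acc ij.1 ij.2) ij.2 ij.1 else acc) acc) := by
  induction L with
  | nil => intro acc h; simpa using h
  | cons x L ih =>
    intro acc hacc
    rw [List.foldl_cons]
    exact ih _ (pvStep_shape matrix n acc x hacc)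

theorem pv_nested_eq_pairs {α : Type} (L M : List Nat) (g : α → Nat → Nat → α) :
    ∀ init : α, L.foldl (fun acc i => M.foldl (fun acc j => g acc i j) acc) init
      = (L.flatMap (fun i => M.map (fun j => (i, j)))).foldl (fun acc ij => g acc ij.1 ij.2) init := by
  induction L with
  | nil => intro init; rfl
  | cons a L ih =>
    intro init
    rw [List.foldl_cons, List.flatMap_cons, List.foldl_append, ih, List.foldl_map]

theorem pvInit_shape (n : Nat) : pvShape n ((List.range n).map (fun _ => List.replicate n (0 : Int))) := by
  refine ⟨by simp, fun k hk => ?_⟩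
  rw [List.getD_eq_getElem _ _ (by simpa using hk)]
  simp

theorem pvInit_getC (n p q : Nat) :
    pvGetC ((List.range n).map (fun _ => List.replicate n (0 : Int))) p q = 0 := by
  unfold pvGetC
  rcases Nat.lt_or_ge p n with hp | hp
  · have h1 : ((List.range n).map (fun _ => List.replicate n (0 : Int))).getD p [] = List.replicate n 0 := by
      rw [List.getD_eq_getElem _ _ (by simpa using hp)]
      simp
    rw [h1]
    rcases Nat.lt_or_ge q n with hq | hq
    · rw [List.getD_eq_getElem _ _ (by simpa using hq)]
      simp
    · rw [List.getD_eq_default _ _ (by simpa using hq)]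
  · rw [List.getD_eq_default ((List.range n).map (fun _ => List.replicate n (0 : Int))) [] (by simpa using hp)]
    rfl

theorem pvA_eq_pairs (matrix : List (List Int)) :
    convertMatrix matrix =
      ((List.range matrix.length).flatMap (fun i => (List.range matrix.length).map (fun j => (i, j)))).foldl
        (fun acc ij => if pvGetC matrix ij.1 ij.2 = 1 then pvSetCell (pvSetCell acc ij.1 ij.2) ij.2 ij.1 else acc)
        ((List.range matrix.length).map (fun _ => List.replicate matrix.length (0 : Int))) := by
  exact pv_nested_eq_pairs (List.range matrix.length) (List.range matrix.length)
    (fun acc i j => if pvGetC matrix i j = 1 then pvSetCell (pvSetCell acc i j) j i else acc) _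

theorem pvPairs_mem (n : Nat) :
    ∀ ij ∈ (List.range n).flatMap (fun i => (List.range n).map (fun j => (i, j))), ij.1 < n ∧ ij.2 < n := by
  intro ij h
  simp only [List.mem_flatMap, List.mem_map, List.mem_range] at h
  obtain ⟨i, hi, j, hj, rfl⟩ := h
  exact ⟨hi, hj⟩

theorem pv_getD_map_range {α : Type} (n : Nat) (f : Nat → α) (k : Nat) (d : α) :
    ((List.range n).map f).getD k d = if k < n then f k else d := by
  rcases Nat.lt_or_ge k n with h | h
  · rw [List.getD_eq_getElem _ _ (by simpa using h)]
    simp [h]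
  · rw [List.getD_eq_default _ _ (by simpa using h), if_neg (by omega)]

theorem pv_getD_map {α β : Type} (l : List α) (f : α → β) (k : Nat) (d : β) (h : k < l.length) :
    (l.map f).getD k d = f l[k] := by
  rw [List.getD_eq_getElem _ _ (by simpa using h), List.getElem_map]

theorem pv_getD_take {α : Type} (l : List α) (n k : Nat) (d : α) (h1 : k < n) (h2 : k < l.length) :
    (l.take n).getD k d = l.getD k d := by
  rw [List.getD_eq_getElem _ _ (by rw [List.length_take]; exact lt_min h1 h2),
    List.getElem_take, List.getD_eq_getElem _ _ h2]

-- A's result, cellwise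
theorem pvA_getC (matrix : List (List Int)) (p q : Nat)
    (hp : p < matrix.length) (hq : q < matrix.length) :
    pvGetC (convertMatrix matrix) p q
      = if pvGetC matrix p q = 1 ∨ pvGetC matrix q p = 1 then 1 else 0 := by
  rw [pvA_eq_pairs,
    pv_fold_getC matrix matrix.length p q _ _ (pvInit_shape matrix.length) (pvPairs_mem matrix.length),
    pvInit_getC]
  have hiff : (∃ ij ∈ (List.range matrix.length).flatMap (fun i => (List.range matrix.length).map (fun j => (i, j))),
        pvGetC matrix ij.1 ij.2 = 1 ∧ ((p = ij.1 ∧ q = ij.2) ∨ (p = ij.2 ∧ q = ij.1)))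
      ↔ (pvGetC matrix p q = 1 ∨ pvGetC matrix q p = 1) := by
    constructor
    · rintro ⟨⟨i, j⟩, _, h1, (⟨rfl, rfl⟩ | ⟨rfl, rfl⟩)⟩
      · exact Or.inl h1
      · exact Or.inr h1
    · rintro (h | h)
      · exact ⟨(p, q), List.mem_flatMap.2 ⟨p, List.mem_range.2 hp,
          List.mem_map.2 ⟨q, List.mem_range.2 hq, rfl⟩⟩, h, Or.inl ⟨rfl, rfl⟩⟩
      · exact ⟨(q, p), List.mem_flatMap.2 ⟨q, List.mem_range.2 hq,
          List.mem_map.2 ⟨p, List.mem_range.2 hp, rfl⟩⟩, h, Or.inr ⟨rfl, rfl⟩⟩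
  simp only [hiff]

theorem pvA_shape (matrix : List (List Int)) : pvShape matrix.length (convertMatrix matrix) := by
  rw [pvA_eq_pairs]
  exact pv_fold_shape matrix matrix.length _ _ (pvInit_shape matrix.length)

-- B's result, cellwise (under Pre_)
theorem pvB_getC (matrix : List (List Int)) (hpre : Pre_convertMatrix matrix) (p q : Nat)
    (hp : p < matrix.length) (hq : q < matrix.length) :
    pvGetC (convertMatrix_alt matrix) p q
      = if pvGetC matrix p q = 1 ∨ pvGetC matrix q p = 1 then 1 else 0 := by
  have hrowge : ∀ k, (hk : k < matrix.length) → matrix.length ≤ matrix[k].length :=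
    fun k hk => hpre _ (List.getElem_mem hk)
  unfold pvGetC
  simp only [convertMatrix_alt]
  rw [pv_getD_map_range matrix.length _ p [], if_pos hp,
    pv_getD_map_range matrix.length _ q 0, if_pos hq,
    pv_getD_map matrix _ p [] hp,
    pv_getD_map_range matrix.length _ p [], if_pos hp,
    pv_getD_map (matrix.map (fun r => r.take matrix.length)) _ q 0 (by simpa using hq),
    List.getElem_map,
    pv_getD_take matrix[p] matrix.length q 0 hq (lt_of_lt_of_le hq (hrowge p hp)),
    pv_getD_take matrix[q] matrix.length p 0 hp (lt_of_lt_of_le hp (hrowge q hq)),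
    List.getD_eq_getElem matrix [] hp, List.getD_eq_getElem matrix [] hq]

theorem pvB_shape (matrix : List (List Int)) : pvShape matrix.length (convertMatrix_alt matrix) := by
  refine ⟨by simp [convertMatrix_alt], fun k hk => ?_⟩
  have hk' : k < (convertMatrix_alt matrix).length := by
    simpa [convertMatrix_alt] using hk
  rw [List.getD_eq_getElem _ _ hk']
  simp [convertMatrix_alt]

-- ===== VERDICT (by name: the statement is the Claim_ definition above) =====
theorem convertMatrix_spec : Claim_equal_convertMatrix := by
  intro matrix _ hpre
  unfold Spec_convertMatrix
  have hA := pvA_shape matrix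
  have hB := pvB_shape matrix
  apply List.ext_getElem (by rw [hA.1, hB.1])
  intro p hp hp'
  have hpn : p < matrix.length := by rw [← hA.1]; exact hp
  apply List.ext_getElem
  · have h1 := hA.2 p hpn
    have h2 := hB.2 p hpn
    rw [List.getD_eq_getElem _ _ hp] at h1
    rw [List.getD_eq_getElem _ _ hp'] at h2
    rw [h1, h2]
  · intro q hq hq'
    have hqn : q < matrix.length := by
      have := hA.2 p hpn
      rw [List.getD_eq_getElem _ _ hp] at this
      omega
    have e1 : (convertMatrix matrix)[p][q] = pvGetC (convertMatrix matrix) p q := by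
      unfold pvGetC
      rw [List.getD_eq_getElem _ _ hp, List.getD_eq_getElem _ _ hq]
    have e2 : (convertMatrix_alt matrix)[p][q] = pvGetC (convertMatrix_alt matrix) p q := by
      unfold pvGetC
      rw [List.getD_eq_getElem _ _ hp', List.getD_eq_getElem _ _ hq']
    rw [e1, e2, pvA_getC matrix p q hpn hqn, pvB_getC matrix hpre p q hpn hqn]
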